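-- pv_equiv track=rewrite | github.com/niranois13/holbertonschool-Markdown2HTML | markdown2html.py | c_section
-- ===== SOURCE A (Python) =====
-- def c_section(line):
--     """
--     Function used to remove all occurence of the letter 'c' - case insensitive:
--     'I love my ((Chinchilla))' turns to 'I love my hinhilla'
--     :params line: str - The string to be c sectionned.
--     Return: The string without 'c'
--     """
--     formatted_line = []
--     i = 0
--
--     while i < len(line):
--         if line[i:i+2] == '((' and line[i-1] != '\\':
--             next_Csection_tag = line.find('))', i+2)
--             if next_Csection_tag != -1:
--                 to_section_part = line[i+2:next_Csection_tag]
--                 sectionned_part = ''.join(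
--                     [ch for ch in to_section_part if ch.lower() != 'c']
--                     )
--                 formatted_line.append(sectionned_part)
--                 i = next_Csection_tag + 2
--             else:
--                 formatted_line.append(line[i])
--                 i += 1
--         else:
--             formatted_line.append(line[i])
--             i += 1
--
--     return ''.join(formatted_line)
-- ===== SOURCE B (Python) =====
-- DROP_C = str.maketrans('', '', 'cC')
--
--
-- def c_section(line):
--     """Remove c/C inside ((...)) sections by jumping between delimiters with
--     find() instead of scanning character by character."""
--     parts = []
--     pos = 0
--     while True:
--         j = line.find('((', pos)
--         if j == -1:
--             parts.append(line[pos:])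
--             return ''.join(parts)
--         if line[j - 1] == '\\':
--             parts.append(line[pos:j + 1])
--             pos = j + 1
--             continue
--         k = line.find('))', j + 2)
--         if k == -1:
--             parts.append(line[pos:])
--             return ''.join(parts)
--         parts.append(line[pos:j])
--         parts.append(line[j + 2:k].translate(DROP_C))
--         pos = k + 2
-- ===== Notes on version B (the rewrite author's own statement) =====
-- stated objective: faster
-- what changed: A scans character by character and re-runs the search for the closing delimiter from scratch at every opening delimiter it meets (quadratic on runs of unclosed openers); B jumps from delimiter to delimiter with str.find, copies whole slices between matches and strips c/C with str.translate, so every search starts where the previous one stopped and the line is traversed once.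
import Mathlib
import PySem

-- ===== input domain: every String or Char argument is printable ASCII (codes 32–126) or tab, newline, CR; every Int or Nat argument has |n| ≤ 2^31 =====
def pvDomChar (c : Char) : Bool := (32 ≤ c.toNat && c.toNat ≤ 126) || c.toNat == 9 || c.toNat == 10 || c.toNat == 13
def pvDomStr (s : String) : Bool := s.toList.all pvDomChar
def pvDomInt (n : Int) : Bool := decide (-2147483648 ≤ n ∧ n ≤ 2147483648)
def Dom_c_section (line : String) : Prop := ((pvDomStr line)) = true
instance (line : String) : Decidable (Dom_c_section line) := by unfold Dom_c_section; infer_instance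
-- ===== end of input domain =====

-- B replaces A's per-character scan (which re-runs find('))') at every opener) by a segment-jumping
-- scan over find('((') that copies whole slices between delimiters; same return value on every input.

-- ===== PORT A =====
-- literal port of Source A; the loop index i is driven by a fuel argument (one unit per iteration;
-- i strictly increases each iteration, so fuel = len(line) is enough and the guard never fires);
-- acc models the joined list of appended pieces
def pvALoop (cs : List Char) : Nat → Nat → List Char → List Char
  | 0, _, acc => acc
  | fuel + 1, i, acc =>
    if hlt : i < cs.length then
      if PySem.List.slice cs (some (i : Int)) (some ((i : Int) + 2)) = ['(', '('] ∧
         PySem.List.pyGet? cs ((i : Int) - 1) ≠ some '\\' then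
        let t := PySem.Chars.findFrom cs [')', ')'] ((i : Int) + 2) none
        if t ≠ -1 then
          pvALoop cs fuel (t.toNat + 2)
            (acc ++ (PySem.List.slice cs (some ((i : Int) + 2)) (some t)).filter
              (fun ch => PySem.Chars.lower [ch] != ['c']))
        else
          pvALoop cs fuel (i + 1) (acc ++ [cs[i]])
      else
        pvALoop cs fuel (i + 1) (acc ++ [cs[i]])
    else acc

def c_section (line : String) : String :=
  String.ofList (pvALoop line.toList line.toList.length 0 [])

-- ===== PORT B =====
-- literal port of Source B (same fuel scheme: pos strictly increases each iteration)
def pvStripC (cs : List Char) : List Char := cs.filter (fun ch => ch != 'c' && ch != 'C')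

def pvBLoop (cs : List Char) : Nat → Nat → List Char → List Char
  | 0, _, parts => parts
  | fuel + 1, pos, parts =>
    let j := PySem.Chars.findFrom cs ['(', '('] (pos : Int) none
    if j = -1 then
      parts ++ PySem.List.slice cs (some (pos : Int)) none
    else if PySem.List.pyGet? cs (j - 1) = some '\\' then
      pvBLoop cs fuel (j.toNat + 1) (parts ++ PySem.List.slice cs (some (pos : Int)) (some (j + 1)))
    else
      let k := PySem.Chars.findFrom cs [')', ')'] (j + 2) none
      if k = -1 then
        parts ++ PySem.List.slice cs (some (pos : Int)) none
      else
        pvBLoop cs fuel (k.toNat + 2)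
          (parts ++ PySem.List.slice cs (some (pos : Int)) (some j) ++
            pvStripC (PySem.List.slice cs (some (j + 2)) (some k)))

def c_section_alt (line : String) : String :=
  String.ofList (pvBLoop line.toList line.toList.length 0 [])

-- ===== PRECONDITION & SPEC =====
def Spec_c_section (line : String) (out : String) : Prop := out = c_section_alt line
instance (line : String) (out : String) : Decidable (Spec_c_section line out) := by
  unfold Spec_c_section; infer_instance

-- ===== CLAIM (what is proved, stated in full; the proofs are below) =====
def Claim_equal_c_section : Prop :=
  ∀ (line : String), Dom_c_section line → Spec_c_section line (c_section line)

-- ===== LEMMAS AND PROOFS =====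

lemma pvFF_gtLen (cs sub : List Char) (k : Nat) (h : cs.length < k) :
    PySem.Chars.findFrom cs sub (k : Int) none = -1 := by
  simp only [PySem.Chars.findFrom]
  have h1 : ¬ ((k : Int) < 0) := by omega
  rw [if_neg h1, if_pos (by exact_mod_cast h)]

lemma pvFF_spec (cs sub : List Char) (k : Nat)
    (h : PySem.Chars.findFrom cs sub (k : Int) none ≠ -1) :
    k ≤ cs.length ∧
    k ≤ (PySem.Chars.findFrom cs sub (k : Int) none).toNat ∧
    (PySem.Chars.findFrom cs sub (k : Int) none).toNat + sub.length ≤ cs.length ∧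
    sub <+: cs.drop (PySem.Chars.findFrom cs sub (k : Int) none).toNat ∧
    (∀ i : Nat, k ≤ i → i < (PySem.Chars.findFrom cs sub (k : Int) none).toNat →
       ¬ sub <+: cs.drop i) ∧
    0 ≤ PySem.Chars.findFrom cs sub (k : Int) none := by
  have hklen : k ≤ cs.length := by
    by_contra hgt
    exact h (pvFF_gtLen cs sub k (by omega))
  obtain ⟨hge, hpre, hmin⟩ := PySem.Chars.findFrom_natCast_spec cs sub k hklen h
  have hnn : 0 ≤ PySem.Chars.findFrom cs sub (k : Int) none := le_trans (by omega) hge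
  have hgeN : k ≤ (PySem.Chars.findFrom cs sub (k : Int) none).toNat := by omega
  have hlen : (PySem.Chars.findFrom cs sub (k : Int) none).toNat + sub.length ≤ cs.length := by
    have h1 := hpre.length_le
    have h2 : (PySem.Chars.findFrom cs sub (k : Int) none).toNat ≤ cs.length := by
      have h3 := PySem.Chars.findFrom_natCast cs sub k hklen
      rw [h3] at h ⊢
      split at h
      · exact absurd rfl h
      · have h4 := PySem.Chars.find_le_length (cs.drop k) sub
        simp only [List.length_drop] at h4
        split
        · omega
        · omega
    simp only [List.length_drop] at h1
    omega
  exact ⟨hklen, hgeN, hlen, hpre, hmin, hnn⟩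

lemma pvOpenIff (cs : List Char) (i : Nat) :
    PySem.List.slice cs (some (i : Int)) (some ((i : Int) + 2)) = ['(', '('] ↔
      ['(', '('] <+: cs.drop i := by
  rw [show ((i : Int) + 2) = ((i + 2 : Nat) : Int) by push_cast; ring,
    PySem.List.slice_natCast, show i + 2 - i = 2 by omega]
  constructor
  · intro h
    exact List.prefix_iff_eq_take.mpr (by simpa using h.symm)
  · intro h
    have h2 := List.prefix_iff_eq_take.mp h
    simpa using h2.symm

lemma pvOccLen (cs sub : List Char) (i : Nat) (h : sub <+: cs.drop i) (hne : sub ≠ []) :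
    i + sub.length ≤ cs.length := by
  have h1 := h.length_le
  simp only [List.length_drop] at h1
  have h2 : 0 < sub.length := List.length_pos_of_ne_nil hne
  by_cases h3 : i ≤ cs.length
  · omega
  · rw [List.drop_eq_nil_of_le (by omega)] at h
    have := h.length_le
    simp at this
    omega

lemma pvLowerNeC (ch : Char) : (PySem.Chars.lower [ch] != ['c']) = (ch != 'c' && ch != 'C') := by
  have htc : ∀ d : Char, d.toNat = 67 → d = 'C' := by
    intro d h
    apply Char.ext; apply UInt32.toNat_inj.mp
    show d.toNat = ('C' : Char).toNat
    rw [h]; rfl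
  simp only [PySem.Chars.lower, List.map, PySem.Chars.lowerChar, PySem.Chars.isupper]
  by_cases h1 : ('A' ≤ ch ∧ ch ≤ 'Z')
  · have h2 : 65 ≤ ch.toNat ∧ ch.toNat ≤ 90 := by
      have a := h1.1; have b := h1.2
      rw [Char.le_def, UInt32.le_iff_toNat_le] at a b
      exact ⟨a, b⟩
    rw [if_pos (by simp [h1.1, h1.2])]
    have hval : (ch.toNat + 32).isValidChar := Or.inl (by omega)
    have h3 : (Char.ofNat (ch.toNat + 32)) = 'c' ↔ ch = 'C' := by
      constructor
      · intro h
        have h9 : (Char.ofNat (ch.toNat + 32)).toNat = 99 := by rw [h]; rfl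
        rw [Char.toNat_ofNat, if_pos hval] at h9
        exact htc ch (by omega)
      · intro h; subst h; rfl
    have hnotc : ch ≠ 'c' := by rintro rfl; revert h2; decide
    by_cases h4 : ch = 'C'
    · subst h4; decide
    · have hne : Char.ofNat (ch.toNat + 32) ≠ 'c' := fun h => h4 (h3.mp h)
      rw [show ([Char.ofNat (ch.toNat + 32)] != ['c']) = true from by simp [hne],
        show (ch != 'c' && ch != 'C') = true from by simp [hnotc, h4]]
  · rw [if_neg (by simpa using fun a b => h1 ⟨a, b⟩)]
    have hup : ch ≠ 'C' := by rintro rfl; exact h1 ⟨by decide, by decide⟩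
    by_cases h5 : ch = 'c'
    · subst h5; decide
    · rw [show ([ch] != ['c']) = true from by simp [h5],
        show (ch != 'c' && ch != 'C') = true from by simp [h5, hup]]

lemma pvInfix_drop_iff (s sub : List Char) (m : Nat) :
    sub <:+: s.drop m ↔ ∃ p, m ≤ p ∧ sub <+: s.drop p := by
  constructor
  · intro h
    obtain ⟨t, hpre, hsuf⟩ := List.infix_iff_prefix_suffix.mp h
    have he := List.suffix_iff_eq_drop.mp hsuf
    refine ⟨m + ((s.drop m).length - t.length), by omega, ?_⟩
    rw [← List.drop_drop]
    exact he ▸ hpre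
  · rintro ⟨p, hmp, hpre⟩
    apply List.infix_iff_prefix_suffix.mpr
    refine ⟨s.drop p, hpre, ?_⟩
    have he : s.drop p = (s.drop m).drop (p - m) := by
      rw [List.drop_drop]; congr 1; omega
    rw [he]
    exact List.drop_suffix _ _

lemma pvTakeExt (cs : List Char) (p q : Nat) (hpq : p ≤ q) (hq : q < cs.length) :
    (cs.drop p).take (q + 1 - p) = (cs.drop p).take (q - p) ++ [cs[q]] := by
  rw [show q + 1 - p = (q - p) + 1 by omega, List.take_add_one]
  congr 1
  rw [List.getElem?_drop, show p + (q - p) = q by omega, List.getElem?_eq_getElem hq]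
  rfl

lemma pvDropSplit (cs : List Char) (p q : Nat) (hpq : p ≤ q) (hq : q < cs.length) :
    cs.drop p = (cs.drop p).take (q - p) ++ cs[q] :: cs.drop (q + 1) := by
  conv_lhs => rw [← List.take_append_drop (q - p) (cs.drop p)]
  congr 1
  rw [List.drop_drop, show p + (q - p) = q by omega]
  exact List.drop_eq_getElem_cons hq

lemma pvADone (cs : List Char) (f i : Nat) (acc : List Char) (h : cs.length ≤ i) :
    pvALoop cs f i acc = acc := by
  cases f with
  | zero => rfl
  | succ f => rw [pvALoop, dif_neg (by omega)]

lemma pvAFuel (cs : List Char) :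
    ∀ f g i acc, cs.length ≤ i + f → cs.length ≤ i + g →
      pvALoop cs f i acc = pvALoop cs g i acc := by
  intro f
  induction f with
  | zero =>
    intro g i acc hf hg
    rw [pvADone cs g i acc (by omega)]; rfl
  | succ f ih =>
    intro g i acc hf hg
    cases g with
    | zero => rw [pvADone cs (f + 1) i acc (by omega)]; rfl
    | succ g =>
      simp only [pvALoop]
      by_cases hlt : i < cs.length
      · rw [dif_pos hlt, dif_pos hlt]
        by_cases hop : (PySem.List.slice cs (some (i : Int)) (some ((i : Int) + 2)) = ['(', '('] ∧
            PySem.List.pyGet? cs ((i : Int) - 1) ≠ some '\\')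
        · rw [if_pos hop, if_pos hop]
          by_cases ht : PySem.Chars.findFrom cs [')', ')'] ((i : Int) + 2) none ≠ -1
          · rw [if_pos ht, if_pos ht]
            have h3 : ((i : Int) + 2) = ((i + 2 : Nat) : Int) := by push_cast; ring
            have hne' : PySem.Chars.findFrom cs [')', ')'] (((i + 2 : Nat)) : Int) none ≠ -1 := by
              rw [← h3]; exact ht
            have h4 := (pvFF_spec cs [')', ')'] (i + 2) hne').2.1
            have h5 : (PySem.Chars.findFrom cs [')', ')'] ((i : Int) + 2) none).toNat =
                (PySem.Chars.findFrom cs [')', ')'] (((i + 2 : Nat)) : Int) none).toNat := by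
              rw [h3]
            apply ih <;> omega
          · rw [if_neg ht, if_neg ht]
            apply ih <;> omega
        · rw [if_neg hop, if_neg hop]
          apply ih <;> omega
      · rw [dif_neg hlt, dif_neg hlt]

-- A copies characters verbatim over a stretch containing no '((' occurrence
lemma pvCopy (cs : List Char) (j : Nat) (hj : j ≤ cs.length) :
    ∀ d i acc f g, j = i + d → cs.length ≤ i + f → cs.length ≤ j + g →
      (∀ p, i ≤ p → p < j → ¬ ['(', '('] <+: cs.drop p) →
      pvALoop cs f i acc = pvALoop cs g j (acc ++ (cs.drop i).take (j - i)) := by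
  intro d
  induction d with
  | zero =>
    intro i acc f g hd hf hg hno
    have hji : j = i := by omega
    subst hji
    simp only [Nat.sub_self, List.take_zero, List.append_nil]
    exact pvAFuel cs f g j acc hf hg
  | succ d ih =>
    intro i acc f g hd hf hg hno
    have hilt : i < cs.length := by omega
    obtain ⟨f', rfl⟩ : ∃ f', f = f' + 1 := ⟨f - 1, by omega⟩
    conv_lhs => rw [pvALoop]
    rw [dif_pos hilt]
    have hop : ¬ (PySem.List.slice cs (some (i : Int)) (some ((i : Int) + 2)) = ['(', '('] ∧
        PySem.List.pyGet? cs ((i : Int) - 1) ≠ some '\\') := by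
      intro hcon
      exact hno i le_rfl (by omega) ((pvOpenIff cs i).mp hcon.1)
    rw [if_neg hop]
    rw [ih (i + 1) (acc ++ [cs[i]]) f' g (by omega) (by omega) hg
      (fun p hp1 hp2 => hno p (by omega) hp2)]
    congr 1
    rw [List.append_assoc]
    congr 1
    rw [show j - i = (j - (i + 1)) + 1 by omega]
    rw [List.drop_eq_getElem_cons hilt, List.take_succ_cons]
    rfl

-- with no '))' at any position ≥ i+1, A copies the rest verbatim
lemma pvNoClose (cs : List Char) :
    ∀ f i acc, cs.length ≤ i + f → (∀ p, i + 1 ≤ p → ¬ [')', ')'] <+: cs.drop p) →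
      pvALoop cs f i acc = acc ++ cs.drop i := by
  intro f
  induction f with
  | zero =>
    intro i acc h hno
    rw [List.drop_eq_nil_of_le (by omega), List.append_nil]; rfl
  | succ f ih =>
    intro i acc h hno
    by_cases hlt : i < cs.length
    · have hdrop : cs.drop i = cs[i] :: cs.drop (i + 1) := List.drop_eq_getElem_cons hlt
      conv_lhs => rw [pvALoop]
      rw [dif_pos hlt]
      by_cases hop : (PySem.List.slice cs (some (i : Int)) (some ((i : Int) + 2)) = ['(', '('] ∧
          PySem.List.pyGet? cs ((i : Int) - 1) ≠ some '\\')
      · have hocc := (pvOpenIff cs i).mp hop.1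
        have hlen2 := pvOccLen cs ['(', '('] i hocc (by simp)
        simp only [List.length_cons, List.length_nil] at hlen2
        have ht : PySem.Chars.findFrom cs [')', ')'] ((i : Int) + 2) none = -1 := by
          rw [show ((i : Int) + 2) = ((i + 2 : Nat) : Int) by push_cast; ring,
            PySem.Chars.findFrom_natCast_eq_neg_one_iff cs [')', ')'] (i + 2) (by omega),
            pvInfix_drop_iff]
          rintro ⟨p, hp1, hp2⟩
          exact hno p (by omega) hp2
        rw [if_pos hop, if_neg (by simp [ht])]
        rw [ih (i + 1) (acc ++ [cs[i]]) (by omega) (fun p hp => hno p (by omega))]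
        rw [List.append_assoc, hdrop]
        rfl
      · rw [if_neg hop]
        rw [ih (i + 1) (acc ++ [cs[i]]) (by omega) (fun p hp => hno p (by omega))]
        rw [List.append_assoc, hdrop]
        rfl
    · rw [pvADone cs (f + 1) i acc (by omega), List.drop_eq_nil_of_le (by omega), List.append_nil]

-- main lockstep lemma
lemma pvMain (cs : List Char) :
    ∀ f pos acc g, pos ≤ cs.length → cs.length ≤ pos + f → cs.length ≤ pos + g →
      pvBLoop cs f pos acc = pvALoop cs g pos acc := by
  intro f
  induction f with
  | zero =>
    intro pos acc g hpos hf hg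
    rw [pvADone cs g pos acc (by omega)]; rfl
  | succ f ih =>
    intro pos acc g hpos hf hg
    simp only [pvBLoop]
    by_cases hj : PySem.Chars.findFrom cs ['(', '('] (pos : Int) none = -1
    · rw [if_pos hj, PySem.List.slice_from_natCast]
      have hno : ∀ p, pos ≤ p → p < cs.length → ¬ ['(', '('] <+: cs.drop p := by
        intro p hp1 hp2 hpre
        exact ((PySem.Chars.findFrom_natCast_eq_neg_one_iff cs ['(', '('] pos hpos).mp hj)
          ((pvInfix_drop_iff cs ['(', '('] pos).mpr ⟨p, hp1, hpre⟩)
      rw [pvCopy cs cs.length le_rfl (cs.length - pos) pos acc g 0 (by omega) hg (by omega) hno,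
        pvADone cs 0 cs.length _ le_rfl]
      congr 1
      exact (List.take_of_length_le (by simp)).symm
    · rw [if_neg hj]
      obtain ⟨hplen, hgeN, hlenN, hoccj, hminj, hnnj⟩ := pvFF_spec cs ['(', '('] pos hj
      simp only [List.length_cons, List.length_nil] at hlenN
      obtain ⟨jn, hjv⟩ : ∃ n : Nat,
          PySem.Chars.findFrom cs ['(', '('] (pos : Int) none = (n : Int) :=
        ⟨(PySem.Chars.findFrom cs ['(', '('] (pos : Int) none).toNat, by omega⟩
      rw [hjv] at hoccj hminj hlenN hgeN ⊢
      simp only [Int.toNat_natCast] at hoccj hminj hlenN hgeN ⊢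
      rw [pvCopy cs jn (by omega) (jn - pos) pos acc g g (by omega) hg (by omega)
        (fun p hp1 hp2 => hminj p hp1 hp2)]
      obtain ⟨g', hg'⟩ : ∃ g', g = g' + 1 := ⟨g - 1, by omega⟩
      subst hg'
      simp only [pvALoop]
      rw [dif_pos (show jn < cs.length by omega)]
      have hAop1 : PySem.List.slice cs (some (jn : Int)) (some ((jn : Int) + 2)) = ['(', '('] :=
        (pvOpenIff cs jn).mpr hoccj
      have hcast2 : ((jn : Int) + 2) = ((jn + 2 : Nat) : Int) := by push_cast; ring
      by_cases hesc : PySem.List.pyGet? cs ((jn : Int) - 1) = some '\\'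
      · -- escaped opener (A's test and B's test are the same expression): both skip it
        have hAc : ¬ (PySem.List.slice cs (some (jn : Int)) (some ((jn : Int) + 2)) = ['(', '('] ∧
            PySem.List.pyGet? cs ((jn : Int) - 1) ≠ some '\\') := fun hcon => hcon.2 hesc
        rw [if_pos hesc, if_neg hAc]
        have hsl : PySem.List.slice cs (some (pos : Int)) (some ((jn : Int) + 1)) =
            (cs.drop pos).take (jn + 1 - pos) := by
          rw [show ((jn : Int) + 1) = ((jn + 1 : Nat) : Int) by push_cast; ring,
            PySem.List.slice_natCast]
        rw [hsl, pvTakeExt cs pos jn (by omega) (by omega), ← List.append_assoc]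
        exact ih (jn + 1) _ g' (by omega) (by omega) (by omega)
      · -- a real opener for both
        rw [if_neg hesc, if_pos (And.intro hAop1 hesc)]
        by_cases hk : PySem.Chars.findFrom cs [')', ')'] ((jn : Int) + 2) none = -1
        · -- no closing '))' anywhere to the right: both copy the rest verbatim
          rw [if_pos hk,
            if_neg (show ¬ (PySem.Chars.findFrom cs [')', ')'] ((jn : Int) + 2) none ≠ -1) from
              fun hnn => hnn hk)]
          have hnc : ∀ p, (jn + 1) + 1 ≤ p → ¬ [')', ')'] <+: cs.drop p := by
            intro p hp hpre
            have h1 : PySem.Chars.findFrom cs [')', ')'] ((jn + 2 : Nat) : Int) none = -1 := by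
              rw [← hcast2]; exact hk
            exact ((PySem.Chars.findFrom_natCast_eq_neg_one_iff cs [')', ')'] (jn + 2)
                (by omega)).mp h1)
              ((pvInfix_drop_iff cs [')', ')'] (jn + 2)).mpr ⟨p, by omega, hpre⟩)
          have hlg1 : cs.length ≤ (jn + 1) + g' := by omega
          rw [pvNoClose cs g' (jn + 1) _ hlg1 hnc, PySem.List.slice_from_natCast]
          simp only [List.append_assoc, List.singleton_append]
          congr 1
          exact pvDropSplit cs pos jn (by omega) (by omega)
        · -- closing '))' found: both strip the section and jump past it
          rw [if_neg hk, if_pos hk]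
          obtain ⟨_, hk1, hk2, hocck, _, hknn⟩ := pvFF_spec cs [')', ')'] (jn + 2)
            (by rw [← hcast2]; exact hk)
          simp only [List.length_cons, List.length_nil] at hk2
          obtain ⟨kn, hkv⟩ : ∃ n : Nat,
              PySem.Chars.findFrom cs [')', ')'] ((jn : Int) + 2) none = (n : Int) := by
            refine ⟨(PySem.Chars.findFrom cs [')', ')'] ((jn : Int) + 2) none).toNat, ?_⟩
            rw [hcast2] at hk ⊢
            have := (pvFF_spec cs [')', ')'] (jn + 2) hk).2.2.2.2.2
            omega
          have hkn : jn + 2 ≤ kn ∧ kn + 2 ≤ cs.length := by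
            rw [hcast2] at hkv
            rw [hkv] at hk1 hk2
            simp only [Int.toNat_natCast] at hk1 hk2
            omega
          rw [hkv]
          simp only [Int.toNat_natCast]
          have hsl1 : PySem.List.slice cs (some (pos : Int)) (some (jn : Int)) =
              (cs.drop pos).take (jn - pos) := PySem.List.slice_natCast cs pos jn
          have hsl2 : PySem.List.slice cs (some ((jn : Int) + 2)) (some (kn : Int)) =
              (cs.drop (jn + 2)).take (kn - (jn + 2)) := by
            rw [hcast2, PySem.List.slice_natCast]
          rw [hsl1, hsl2]
          have hfil : ((cs.drop (jn + 2)).take (kn - (jn + 2))).filter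
                (fun ch => PySem.Chars.lower [ch] != ['c']) =
              pvStripC ((cs.drop (jn + 2)).take (kn - (jn + 2))) := by
            unfold pvStripC
            exact List.filter_congr (fun x _ => pvLowerNeC x)
          rw [hfil]
          exact ih (kn + 2) _ g' (by omega) (by omega) (by omega)

-- ===== VERDICT (by name: the statement is the Claim_ definition above) =====
theorem c_section_spec : Claim_equal_c_section := by
  intro line _
  unfold Spec_c_section c_section c_section_alt
  rw [pvMain line.toList line.toList.length 0 [] line.toList.length (by omega) (by omega)
    (by omega)]
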